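-- pv_equiv track=rewrite | github.com/yashwanth319/Calculator | Finding indices of Closest Temperatures.py | find_closest_temperatures
-- ===== SOURCE A (Python) =====
-- def find_closest_temperatures(temps):
--     if len(temps) < 2:
--         raise ValueError("At least two temperatures are required")
--
--     min_diff = float('inf')
--     index_pair = (-1, -1)
--
--     for i in range(len(temps)):
--         for j in range(i + 1, len(temps)):
--             diff = abs(temps[i] - temps[j])
--             if diff < min_diff:
--                 min_diff = diff
--                 index_pair = (i, j)
--
--     return index_pair
-- ===== SOURCE B (Python) =====
-- def find_closest_temperatures(temps):
--     n = len(temps)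
--     if n < 2:
--         raise ValueError("At least two temperatures are required")
--     order = sorted((v, k) for k, v in enumerate(temps))
--     best = None
--     for p in range(n - 1):
--         va, a = order[p]
--         vb, b = order[p + 1]
--         i, j = (a, b) if a < b else (b, a)
--         cand = (vb - va, i, j)
--         if best is None or cand < best:
--             best = cand
--     return (best[1], best[2])
-- ===== Notes on version B (the rewrite author's own statement) =====
-- stated objective: faster
-- what changed: Replaced the O(n^2) all-pairs scan by sorting the (value, index) pairs once and scanning only adjacent pairs, taking the minimum of (diff, i, j) tuples, which reproduces A's row-major first-strict-improvement tie-breaking exactly.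
import Mathlib
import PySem

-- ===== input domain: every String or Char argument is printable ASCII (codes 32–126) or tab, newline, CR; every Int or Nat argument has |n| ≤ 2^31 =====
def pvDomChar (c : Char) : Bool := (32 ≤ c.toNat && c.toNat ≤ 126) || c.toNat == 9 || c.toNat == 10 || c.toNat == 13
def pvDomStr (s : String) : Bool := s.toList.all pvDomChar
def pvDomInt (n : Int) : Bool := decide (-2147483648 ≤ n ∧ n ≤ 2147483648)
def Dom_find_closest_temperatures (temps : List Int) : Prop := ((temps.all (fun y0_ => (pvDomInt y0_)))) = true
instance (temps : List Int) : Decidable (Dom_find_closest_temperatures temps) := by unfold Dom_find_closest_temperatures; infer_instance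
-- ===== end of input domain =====

-- B replaces A's O(n^2) all-pairs scan by sorting (value, index) pairs and scanning adjacent
-- pairs with a lexicographic (diff, i, j) minimum — same return value, O(n log n).

-- ===== PORT A =====
-- Literal port of A's nested loops. float('inf') is the `none` state of the Option Int
-- accumulator (any diff beats it). temps[i]/temps[j] via pyGetD: loop indices come from
-- range(len(temps)) so they are always in range and the default is never used.
-- The `raise` for len < 2 is excluded by Pre_find_closest_temperatures.
def find_closest_temperatures (temps : List Int) : Int × Int :=
  let n : Int := temps.length
  ((PySem.List.pyRange 0 n 1).foldl (fun st i =>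
      (PySem.List.pyRange (i + 1) n 1).foldl (fun st j =>
        let diff : Int := |PySem.List.pyGetD temps i 0 - PySem.List.pyGetD temps j 0|
        match st.1 with
        | none => (some diff, (i, j))
        | some d => if diff < d then (some diff, (i, j)) else st) st)
    ((none : Option Int), ((-1 : Int), (-1 : Int)))).2

-- ===== PORT B =====
-- Python's `<` on int 3-tuples, ported by hand: lexicographic comparison (exact for int tuples).
def pyLt3 (x y : Int × Int × Int) : Bool :=
  x.1 < y.1 || (x.1 == y.1 && (x.2.1 < y.2.1 || (x.2.1 == y.2.1 && x.2.2 < y.2.2)))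

-- Literal port of Source B: sort the (value, index) pairs (Python tuple sort = sorted2 on the two
-- components), then scan adjacent pairs keeping the tuple-min candidate. order[p]/order[p+1]
-- via pyGetD: p comes from range(n-1) so both are in range and the default is never used.
-- The `raise` for n < 2 (which also makes `best` stay None) is excluded by Pre_.
def find_closest_temperatures_alt (temps : List Int) : Int × Int :=
  let n : Int := temps.length
  let order := PySem.List.sorted2 ((PySem.List.enumerate temps 0).map (fun p => (p.2, p.1)))
      (fun q => q.1) (fun q => q.2) false
  let best := (PySem.List.pyRange 0 (n - 1) 1).foldl (fun best p =>
      let a := PySem.List.pyGetD order p (0, 0)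
      let b := PySem.List.pyGetD order (p + 1) (0, 0)
      let ij := if a.2 < b.2 then (a.2, b.2) else (b.2, a.2)
      let cand : Int × Int × Int := (b.1 - a.1, ij.1, ij.2)
      match best with
      | none => some cand
      | some bst => if pyLt3 cand bst then some cand else some bst)
    (none : Option (Int × Int × Int))
  match best with
  | none => (-1, -1)  -- unreachable under Pre_ (Python raised earlier for n < 2)
  | some bst => (bst.2.1, bst.2.2)

-- ===== PRECONDITION & SPEC =====
-- A raises ValueError for fewer than two temperatures; exactly those inputs are excluded.
def Pre_find_closest_temperatures (temps : List Int) : Prop := 2 ≤ temps.length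
instance (temps : List Int) : Decidable (Pre_find_closest_temperatures temps) := by
  unfold Pre_find_closest_temperatures; infer_instance
def pvWitness_find_closest_temperatures : List Int := [3, 7]

def Spec_find_closest_temperatures (temps : List Int) (out : Int × Int) : Prop := out = find_closest_temperatures_alt temps
instance (temps : List Int) (out : Int × Int) : Decidable (Spec_find_closest_temperatures temps out) := by unfold Spec_find_closest_temperatures; infer_instance

-- ===== CLAIM (what is proved, stated in full; the proofs are below) =====
def Claim_equal_find_closest_temperatures : Prop := ∀ (temps : List Int), Dom_find_closest_temperatures temps → Pre_find_closest_temperatures temps → Spec_find_closest_temperatures temps (find_closest_temperatures temps)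

-- ===== LEMMAS AND PROOFS =====

-- the key A minimises: (|t[i]-t[j]|, i, j), and its strict lexicographic order
def pvKey (t : List Int) (p : Int × Int) : Int × Int × Int :=
  (|PySem.List.pyGetD t p.1 0 - PySem.List.pyGetD t p.2 0|, p.1, p.2)

def pvLt (x y : Int × Int × Int) : Prop :=
  x.1 < y.1 ∨ (x.1 = y.1 ∧ (x.2.1 < y.2.1 ∨ (x.2.1 = y.2.1 ∧ x.2.2 < y.2.2)))

def pvILt (p q : Int × Int) : Prop := p.1 < q.1 ∨ (p.1 = q.1 ∧ p.2 < q.2)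

def pvPairs (t : List Int) : List (Int × Int) :=
  (PySem.List.pyRange 0 t.length 1).flatMap (fun i =>
    (PySem.List.pyRange (i + 1) t.length 1).map (fun j => (i, j)))

def pvSel (b e : Int × Int × Int) : Int × Int × Int := if pyLt3 e b then e else b
def pvSelA (b e : Int × Int × Int) : Int × Int × Int := if e.1 < b.1 then e else b

lemma pyLt3_iff (x y : Int × Int × Int) : pyLt3 x y = true ↔ pvLt x y := by
  simp [pyLt3, pvLt]

lemma pvLt_asymm {x y : Int × Int × Int} (h : pvLt x y) : ¬ pvLt y x := by
  unfold pvLt at *; omega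

lemma pvLe_antisymm {x y : Int × Int × Int} (h1 : ¬ pvLt x y) (h2 : ¬ pvLt y x) : x = y := by
  obtain ⟨x1, x2, x3⟩ := x; obtain ⟨y1, y2, y3⟩ := y
  unfold pvLt at *; simp only [Prod.mk.injEq]; simp only [] at h1 h2; omega

lemma pvLe_trans {x y z : Int × Int × Int} (h1 : ¬ pvLt y x) (h2 : ¬ pvLt z y) : ¬ pvLt z x := by
  unfold pvLt at *; omega

-- fold facts for the lexicographic keep-first minimum
lemma fold_sel_mem : ∀ (xs : List (Int × Int × Int)) (k : Int × Int × Int),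
    xs.foldl pvSel k = k ∨ xs.foldl pvSel k ∈ xs
  | [], k => Or.inl rfl
  | x :: xs, k => by
    simp only [List.foldl_cons]
    by_cases h' : pyLt3 x k = true
    · have e : pvSel k x = x := by unfold pvSel; rw [if_pos h']
      rw [e]
      rcases fold_sel_mem xs x with h | h
      · right; rw [h]; exact List.mem_cons_self
      · right; exact List.mem_cons_of_mem _ h
    · have e : pvSel k x = k := by unfold pvSel; rw [if_neg h']
      rw [e]
      rcases fold_sel_mem xs k with h | h
      · left; exact h
      · right; exact List.mem_cons_of_mem _ h

lemma sel_le_left (k x : Int × Int × Int) : ¬ pvLt k (pvSel k x) := by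
  unfold pvSel; split
  · next h => exact pvLt_asymm ((pyLt3_iff x k).mp h)
  · unfold pvLt; omega

lemma sel_le_right (k x : Int × Int × Int) : ¬ pvLt x (pvSel k x) := by
  unfold pvSel; split
  · unfold pvLt; omega
  · next h => rw [← pyLt3_iff]; simpa using h

lemma fold_sel_le_init : ∀ (xs : List (Int × Int × Int)) (k : Int × Int × Int),
    ¬ pvLt k (xs.foldl pvSel k)
  | [], k => by simp only [List.foldl_nil]; unfold pvLt; omega
  | x :: xs, k => by
    simp only [List.foldl_cons]
    exact pvLe_trans (fold_sel_le_init xs (pvSel k x)) (sel_le_left k x)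

lemma fold_sel_min : ∀ (xs : List (Int × Int × Int)) (k e : Int × Int × Int),
    e ∈ xs → ¬ pvLt e (xs.foldl pvSel k)
  | x :: xs, k, e, he => by
    simp only [List.foldl_cons]
    rcases List.mem_cons.mp he with rfl | h
    · exact pvLe_trans (fold_sel_le_init xs (pvSel k e)) (sel_le_right k e)
    · exact fold_sel_min xs (pvSel k x) e h

-- A's strict-improvement fold equals the lexicographic fold on an index-sorted list
lemma foldA_eq_foldSel : ∀ (xs : List (Int × Int × Int)) (k : Int × Int × Int),
    (∀ e ∈ xs, pvILt k.2 e.2) → xs.Pairwise (fun e f => pvILt e.2 f.2) →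
    xs.foldl pvSelA k = xs.foldl pvSel k
  | [], k, _, _ => rfl
  | x :: xs, k, hk, hp => by
    have hxk : pvILt k.2 x.2 := hk x List.mem_cons_self
    have hstep : pvSelA k x = pvSel k x := by
      unfold pvSelA pvSel
      by_cases h : x.1 < k.1
      · rw [if_pos h, if_pos ((pyLt3_iff x k).mpr (Or.inl h))]
      · rw [if_neg h, if_neg]
        intro hc
        rcases (pyLt3_iff x k).mp hc with h' | ⟨_, h'⟩
        · exact h h'
        · unfold pvILt at hxk; omega
    simp only [List.foldl_cons, hstep]
    refine foldA_eq_foldSel xs (pvSel k x) ?_ hp.of_cons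
    intro e he
    unfold pvSel; split
    · exact (List.pairwise_cons.mp hp).1 e he
    · exact hk e (List.mem_cons_of_mem _ he)

-- ===== reduction of port A to the fold over pvPairs =====
def pvG (st : Option Int × (Int × Int)) (e : Int × Int × Int) : Option Int × (Int × Int) :=
  match st.1 with
  | none => (some e.1, e.2)
  | some d => if e.1 < d then (some e.1, e.2) else st

lemma foldG_some : ∀ (xs : List (Int × Int × Int)) (k : Int × Int × Int),
    xs.foldl pvG (some k.1, k.2) = (some (xs.foldl pvSelA k).1, (xs.foldl pvSelA k).2)
  | [], k => rfl
  | x :: xs, k => by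
    have hstep : pvG (some k.1, k.2) x = (some (pvSelA k x).1, (pvSelA k x).2) := by
      unfold pvG pvSelA; by_cases h : x.1 < k.1 <;> simp [h]
    simp only [List.foldl_cons, hstep]
    exact foldG_some xs (pvSelA k x)

lemma A_eq_fold (t : List Int) (x : Int × Int × Int) (xs : List (Int × Int × Int))
    (h : (pvPairs t).map (pvKey t) = x :: xs) :
    find_closest_temperatures t = (xs.foldl pvG (some x.1, x.2)).2 := by
  have h1 : find_closest_temperatures t
      = (((pvPairs t).map (pvKey t)).foldl pvG ((none : Option Int), ((-1 : Int), (-1 : Int)))).2 := by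
    simp only [find_closest_temperatures, pvPairs, pvKey, pvG, List.foldl_map, List.foldl_flatMap]
  rw [h1, h, List.foldl_cons]
  rfl

lemma mem_pvPairs (t : List Int) (p : Int × Int) :
    p ∈ pvPairs t ↔ 0 ≤ p.1 ∧ p.1 < p.2 ∧ p.2 < (t.length : Int) := by
  unfold pvPairs
  simp only [List.mem_flatMap, List.mem_map, PySem.List.mem_pyRange_one]
  constructor
  · rintro ⟨i, ⟨hi0, hin⟩, j, ⟨hj1, hj2⟩, rfl⟩
    exact ⟨hi0, by omega, hj2⟩
  · rintro ⟨h0, h1, h2⟩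
    exact ⟨p.1, ⟨h0, by omega⟩, p.2, ⟨by omega, h2⟩, rfl⟩

lemma pairwise_pvPairs (t : List Int) : (pvPairs t).Pairwise pvILt := by
  unfold pvPairs
  rw [List.pairwise_flatMap]
  constructor
  · intro i _
    rw [List.pairwise_map]
    exact (PySem.List.pairwise_lt_pyRange_one _ _).imp (fun h => Or.inr ⟨rfl, h⟩)
  · refine (PySem.List.pairwise_lt_pyRange_one _ _).imp ?_
    intro i i' h x hx y hy
    simp only [List.mem_map] at hx hy
    obtain ⟨j, _, rfl⟩ := hx
    obtain ⟨j', _, rfl⟩ := hy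
    exact Or.inl h

-- ===== the sorted list of (value, index) pairs =====
def pvBf (a b : Int × Int) : Bool := decide (a.1 < b.1) || (!decide (b.1 < a.1) && decide (a.2 < b.2))

def pvLeL (a b : Int × Int) : Prop := a.1 < b.1 ∨ (a.1 = b.1 ∧ a.2 ≤ b.2)

def pvOrder (t : List Int) : List (Int × Int) :=
  PySem.List.sorted2 ((PySem.List.enumerate t 0).map (fun p => (p.2, p.1)))
      (fun q => q.1) (fun q => q.2) false

lemma pvBf_true {a b : Int × Int} (h : pvBf a b = true) : pvLeL a b := by
  simp only [pvBf, Bool.or_eq_true, Bool.and_eq_true, Bool.not_eq_true', decide_eq_true_eq,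
    decide_eq_false_iff_not] at h
  unfold pvLeL; omega

lemma pvBf_false {a b : Int × Int} (h : pvBf a b = false) : pvLeL b a := by
  simp only [pvBf, Bool.or_eq_false_iff, Bool.and_eq_false_iff, Bool.not_eq_false',
    decide_eq_true_eq, decide_eq_false_iff_not] at h
  unfold pvLeL
  omega

lemma pvLeL_trans {a b c : Int × Int} (h1 : pvLeL a b) (h2 : pvLeL b c) : pvLeL a c := by
  unfold pvLeL at *; omega

lemma insertBy_pairwise : ∀ (l : List (Int × Int)) (x : Int × Int), l.Pairwise pvLeL →
    (PySem.List.insertBy pvBf x l).Pairwise pvLeL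
  | [], x, _ => by simp [PySem.List.insertBy]
  | y :: ys, x, h => by
    rw [PySem.List.insertBy]
    split
    · next hb =>
      refine List.Pairwise.cons ?_ h
      intro z hz
      rcases List.mem_cons.mp hz with rfl | hz
      · exact pvBf_true hb
      · exact pvLeL_trans (pvBf_true hb) ((List.pairwise_cons.mp h).1 z hz)
    · next hb =>
      refine List.Pairwise.cons ?_ (insertBy_pairwise ys x h.of_cons)
      intro z hz
      rcases (PySem.List.mem_insertBy _ _ _ _).mp hz with rfl | hz
      · exact pvBf_false (Bool.eq_false_iff.mpr hb)
      · exact (List.pairwise_cons.mp h).1 z hz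

lemma foldl_insertBy_pairwise : ∀ (l : List (Int × Int)) (acc : List (Int × Int)),
    acc.Pairwise pvLeL → (l.foldl (fun acc x => PySem.List.insertBy pvBf x acc) acc).Pairwise pvLeL
  | [], acc, h => h
  | x :: l, acc, h => by
    simp only [List.foldl_cons]
    exact foldl_insertBy_pairwise l _ (insertBy_pairwise acc x h)

lemma pvOrder_eq_foldl (t : List Int) :
    pvOrder t = ((PySem.List.enumerate t 0).map (fun p => (p.2, p.1))).foldl
      (fun acc x => PySem.List.insertBy pvBf x acc) [] := rfl

lemma pvOrder_pairwise (t : List Int) : (pvOrder t).Pairwise pvLeL := by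
  rw [pvOrder_eq_foldl]
  exact foldl_insertBy_pairwise _ [] List.Pairwise.nil

lemma pvOrder_perm (t : List Int) :
    (pvOrder t).Perm ((PySem.List.enumerate t 0).map (fun p => (p.2, p.1))) :=
  PySem.List.sorted2_perm _ _ _ _

lemma pvOrder_length (t : List Int) : (pvOrder t).length = t.length := by
  rw [(pvOrder_perm t).length_eq, List.length_map, PySem.List.length_enumerate]

lemma pvOrder_mem (t : List Int) (q : Int × Int) (h : q ∈ pvOrder t) :
    PySem.List.pyGetD t q.2 0 = q.1 ∧ 0 ≤ q.2 ∧ q.2 < (t.length : Int) := by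
  rw [(pvOrder_perm t).mem_iff, List.mem_map] at h
  obtain ⟨p, hp, rfl⟩ := h
  rw [PySem.List.mem_enumerate_iff] at hp
  obtain ⟨k, hk, rfl⟩ := hp
  refine ⟨?_, by omega, by simpa using hk⟩
  rw [PySem.List.pyGetD_eq_getElem t 0 (by omega) (by simpa using hk)]
  simp

lemma pvOrder_snd_nodup (t : List Int) : ((pvOrder t).map (fun q => q.2)).Nodup := by
  refine (((pvOrder_perm t).map (fun q => q.2)).nodup_iff).mpr ?_
  rw [List.map_map]
  have : ((PySem.List.enumerate t 0).map ((fun q : Int × Int => q.2) ∘ (fun p : Int × Int => (p.2, p.1))))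
      = (PySem.List.enumerate t 0).map (fun p => p.1) := by
    apply List.map_congr_left; intro p _; rfl
  rw [this, PySem.List.map_fst_enumerate]
  exact PySem.List.nodup_pyRange_one 0 (0 + t.length)

-- ===== reduction of port B to the fold over the candidate list =====
def pvCand (order : List (Int × Int)) (p : Int) : Int × Int × Int :=
  let a := PySem.List.pyGetD order p (0, 0)
  let b := PySem.List.pyGetD order (p + 1) (0, 0)
  let ij := if a.2 < b.2 then (a.2, b.2) else (b.2, a.2)
  (b.1 - a.1, ij.1, ij.2)

def pvCands (t : List Int) : List (Int × Int × Int) :=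
  (PySem.List.pyRange 0 ((t.length : Int) - 1) 1).map (pvCand (pvOrder t))

def pvGB (b : Option (Int × Int × Int)) (e : Int × Int × Int) : Option (Int × Int × Int) :=
  match b with
  | none => some e
  | some bst => if pyLt3 e bst then some e else some bst

lemma foldGB_some : ∀ (xs : List (Int × Int × Int)) (k : Int × Int × Int),
    xs.foldl pvGB (some k) = some (xs.foldl pvSel k)
  | [], k => rfl
  | x :: xs, k => by
    have hstep : pvGB (some k) x = some (pvSel k x) := by
      unfold pvGB pvSel; by_cases h : pyLt3 x k = true <;> simp [h]
    simp only [List.foldl_cons, hstep]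
    exact foldGB_some xs (pvSel k x)

lemma B_eq_fold (t : List Int) (c : Int × Int × Int) (cs : List (Int × Int × Int))
    (h : pvCands t = c :: cs) :
    find_closest_temperatures_alt t = ((cs.foldl pvSel c).2.1, (cs.foldl pvSel c).2.2) := by
  have h1 : find_closest_temperatures_alt t
      = (match (pvCands t).foldl pvGB none with
         | none => ((-1 : Int), (-1 : Int))
         | some bst => (bst.2.1, bst.2.2)) := by
    simp only [find_closest_temperatures_alt, pvCands, pvCand, pvOrder, pvGB, List.foldl_map]
  rw [h1, h, List.foldl_cons]
  have h2 : pvGB none c = some c := rfl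
  rw [h2, foldGB_some]

lemma abs_eq_sub {a b : Int} (h : a ≤ b) : |a - b| = b - a := by
  rw [abs_sub_comm]; exact abs_of_nonneg (by omega)

lemma order_snd_ne (t : List Int) {w z : Nat} (hw : w < (pvOrder t).length)
    (hz : z < (pvOrder t).length) (hne : w ≠ z) :
    ((pvOrder t)[w]'hw).2 ≠ ((pvOrder t)[z]'hz).2 := by
  intro he
  have h1 : ((pvOrder t).map (fun q => q.2))[w]'(by simpa using hw)
      = ((pvOrder t).map (fun q => q.2))[z]'(by simpa using hz) := by
    simp only [List.getElem_map]; exact he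
  exact hne (((pvOrder_snd_nodup t).getElem_inj_iff).mp h1)

-- every candidate is the key of a genuine pair
lemma cand_is_key (t : List Int) (c : Int × Int × Int) (hc : c ∈ pvCands t) :
    ∃ q ∈ pvPairs t, c = pvKey t q := by
  unfold pvCands at hc
  rw [List.mem_map] at hc
  obtain ⟨p, hp, rfl⟩ := hc
  rw [PySem.List.mem_pyRange_one] at hp
  have hlen := pvOrder_length t
  have hp1 : p.toNat < (pvOrder t).length := by omega
  have hp2 : p.toNat + 1 < (pvOrder t).length := by omega
  have ha : PySem.List.pyGetD (pvOrder t) p (0, 0) = (pvOrder t)[p.toNat] :=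
    PySem.List.pyGetD_eq_getElem _ _ hp.1 (by omega)
  have hb : PySem.List.pyGetD (pvOrder t) (p + 1) (0, 0) = (pvOrder t)[p.toNat + 1] := by
    rw [PySem.List.pyGetD_eq_getElem _ _ (by omega) (by omega)]
    congr 1; omega
  obtain ⟨hav, ha0, han⟩ := pvOrder_mem t _ (List.getElem_mem hp1)
  obtain ⟨hbv, hb0, hbn⟩ := pvOrder_mem t _ (List.getElem_mem hp2)
  have hne : ((pvOrder t)[p.toNat]).2 ≠ ((pvOrder t)[p.toNat + 1]).2 :=
    order_snd_ne t hp1 hp2 (by omega)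
  have hleL : pvLeL ((pvOrder t)[p.toNat]) ((pvOrder t)[p.toNat + 1]) :=
    (List.pairwise_iff_getElem.mp (pvOrder_pairwise t)) _ _ hp1 hp2 (by omega)
  have hab1 : ((pvOrder t)[p.toNat]).1 ≤ ((pvOrder t)[p.toNat + 1]).1 := by
    unfold pvLeL at hleL; omega
  simp only [pvCand, ha, hb]
  by_cases hij : ((pvOrder t)[p.toNat]).2 < ((pvOrder t)[p.toNat + 1]).2
  · refine ⟨(((pvOrder t)[p.toNat]).2, ((pvOrder t)[p.toNat + 1]).2), ?_, ?_⟩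
    · rw [mem_pvPairs]; exact ⟨ha0, hij, hbn⟩
    · rw [if_pos hij]
      unfold pvKey
      simp only [hav, hbv]
      rw [abs_eq_sub hab1]
  · have hij' : ((pvOrder t)[p.toNat + 1]).2 < ((pvOrder t)[p.toNat]).2 := by omega
    refine ⟨(((pvOrder t)[p.toNat + 1]).2, ((pvOrder t)[p.toNat]).2), ?_, ?_⟩
    · rw [mem_pvPairs]; exact ⟨hb0, hij', han⟩
    · rw [if_neg hij]
      unfold pvKey
      simp only [hav, hbv]
      rw [abs_sub_comm, abs_eq_sub hab1]

lemma idx_mem_order (t : List Int) (i : Int) (h0 : 0 ≤ i) (h1 : i < (t.length : Int)) :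
    (PySem.List.pyGetD t i 0, i) ∈ pvOrder t := by
  rw [(pvOrder_perm t).mem_iff, List.mem_map]
  refine ⟨(i, PySem.List.pyGetD t i 0), ?_, rfl⟩
  rw [PySem.List.mem_enumerate_iff]
  refine ⟨i.toNat, by omega, ?_⟩
  rw [PySem.List.pyGetD_eq_getElem t 0 h0 h1]
  simp only [Prod.mk.injEq]
  constructor
  · omega
  · trivial

-- if the positions of the minimal pair in the sorted list were not adjacent, a middle
-- element would give a lexicographically smaller key — contradiction
lemma no_middle (t : List Int) (q : Int × Int)
    (hq : 0 ≤ q.1 ∧ q.1 < q.2 ∧ q.2 < (t.length : Int))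
    (hmin : ∀ r ∈ pvPairs t, ¬ pvLt (pvKey t r) (pvKey t q))
    (w z : Nat) (hwz : w + 1 < z) (hz : z < (pvOrder t).length)
    (hset : ((pvOrder t)[w]'(by omega) = (PySem.List.pyGetD t q.1 0, q.1) ∧
             (pvOrder t)[z]'hz = (PySem.List.pyGetD t q.2 0, q.2))
          ∨ ((pvOrder t)[w]'(by omega) = (PySem.List.pyGetD t q.2 0, q.2) ∧
             (pvOrder t)[z]'hz = (PySem.List.pyGetD t q.1 0, q.1))) :
    False := by
  have hw : w < (pvOrder t).length := by omega
  have hw1 : w + 1 < (pvOrder t).length := by omega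
  set a := (pvOrder t)[w]'hw with hadef
  set k := (pvOrder t)[w + 1]'hw1 with hkdef
  set b := (pvOrder t)[z]'hz with hbdef
  have hP := List.pairwise_iff_getElem.mp (pvOrder_pairwise t)
  have hak : pvLeL a k := hP _ _ hw hw1 (by omega)
  have hkb : pvLeL k b := hP _ _ hw1 hz (by omega)
  have hab : pvLeL a b := hP _ _ hw hz (by omega)
  obtain ⟨hav, ha0, han⟩ := pvOrder_mem t a (List.getElem_mem hw)
  obtain ⟨hkv, hk0, hkn⟩ := pvOrder_mem t k (List.getElem_mem hw1)
  obtain ⟨hbv, hb0, hbn⟩ := pvOrder_mem t b (List.getElem_mem hz)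
  have hka : k.2 ≠ a.2 := order_snd_ne t hw1 hw (by omega)
  have hkb2 : k.2 ≠ b.2 := order_snd_ne t hw1 hz (by omega)
  have hak1 : a.1 ≤ k.1 := by unfold pvLeL at hak; omega
  have hkb1 : k.1 ≤ b.1 := by unfold pvLeL at hkb; omega
  -- the key of q, written through a and b
  have hdq : (pvKey t q).1 = b.1 - a.1 := by
    rcases hset with ⟨hA, hB⟩ | ⟨hA, hB⟩
    · unfold pvKey
      have : PySem.List.pyGetD t q.1 0 = a.1 := by rw [hA]
      rw [this]
      have : PySem.List.pyGetD t q.2 0 = b.1 := by rw [hB]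
      rw [this]
      exact abs_eq_sub (by omega)
    · unfold pvKey
      have : PySem.List.pyGetD t q.1 0 = b.1 := by rw [hB]
      rw [this]
      have : PySem.List.pyGetD t q.2 0 = a.1 := by rw [hA]
      rw [this]
      rw [abs_sub_comm]; exact abs_eq_sub (by omega)
  -- pair (a, k) : x := k.1 - a.1 ≥ diff
  have hr1 : (if a.2 < k.2 then (a.2, k.2) else (k.2, a.2)) ∈ pvPairs t := by
    rw [mem_pvPairs]; split <;> simp only [] <;> omega
  have hx := hmin _ hr1
  have hxval : (pvKey t (if a.2 < k.2 then (a.2, k.2) else (k.2, a.2))).1 = k.1 - a.1 := by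
    unfold pvKey; split
    · simp only [hav, hkv]; exact abs_eq_sub hak1
    · simp only [hav, hkv]; rw [abs_sub_comm]; exact abs_eq_sub hak1
  have hxge : k.1 - a.1 ≥ b.1 - a.1 := by
    by_contra hlt
    exact hx (Or.inl (by rw [hxval, hdq]; omega))
  -- pair (k, b) : y := b.1 - k.1 ≥ diff
  have hr2 : (if k.2 < b.2 then (k.2, b.2) else (b.2, k.2)) ∈ pvPairs t := by
    rw [mem_pvPairs]; split <;> simp only [] <;> omega
  have hy := hmin _ hr2
  have hyval : (pvKey t (if k.2 < b.2 then (k.2, b.2) else (b.2, k.2))).1 = b.1 - k.1 := by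
    unfold pvKey; split
    · simp only [hkv, hbv]; exact abs_eq_sub hkb1
    · simp only [hkv, hbv]; rw [abs_sub_comm]; exact abs_eq_sub hkb1
  have hyge : b.1 - k.1 ≥ b.1 - a.1 := by
    by_contra hlt
    exact hy (Or.inl (by rw [hyval, hdq]; omega))
  -- hence all three values are equal and the diff is 0
  have heq : a.1 = k.1 ∧ k.1 = b.1 := by omega
  have hak2 : a.2 < k.2 := by unfold pvLeL at hak; omega
  have hkb3 : k.2 < b.2 := by unfold pvLeL at hkb; omega
  -- then q = (a.2, b.2) and the pair (a.2, k.2) has an equal diff but smaller second index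
  rcases hset with ⟨hA, hB⟩ | ⟨hA, hB⟩
  · have ha2 : a.2 = q.1 := by rw [hA]
    have hb2 : b.2 = q.2 := by rw [hB]
    have hr1' := hr1
    rw [if_pos hak2] at hr1' hxval
    have := hmin _ hr1'
    apply this
    have hk2 : (pvKey t (a.2, k.2)).2 = (a.2, k.2) := rfl
    have hkq : (pvKey t q).2 = (q.1, q.2) := rfl
    unfold pvLt
    rw [hxval, hdq, hk2, hkq]
    simp only []
    right
    exact ⟨by omega, Or.inr ⟨by omega, by omega⟩⟩
  · -- a.2 = q.2 and b.2 = q.1 with a.2 < b.2 contradicts q.1 < q.2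
    have ha2 : a.2 = q.2 := by rw [hA]
    have hb2 : b.2 = q.1 := by rw [hB]
    omega

-- the minimal key is one of the candidates (the adjacency argument)
lemma min_mem_cands (t : List Int) (m : Int × Int × Int)
    (hmem : ∃ q ∈ pvPairs t, m = pvKey t q)
    (hmin : ∀ q ∈ pvPairs t, ¬ pvLt (pvKey t q) m) :
    m ∈ pvCands t := by
  obtain ⟨q, hq, rfl⟩ := hmem
  rw [mem_pvPairs] at hq
  have hlen := pvOrder_length t
  obtain ⟨u, hu, hu'⟩ := List.mem_iff_getElem.mp (idx_mem_order t q.1 hq.1 (by omega))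
  obtain ⟨v, hv, hv'⟩ := List.mem_iff_getElem.mp (idx_mem_order t q.2 (by omega) hq.2.2)
  have huv : u ≠ v := by
    intro he
    subst he
    have h := hu'.symm.trans hv'
    have := congrArg Prod.snd h
    simp only [] at this
    omega
  have hP := List.pairwise_iff_getElem.mp (pvOrder_pairwise t)
  rcases Nat.lt_or_ge u v with hlt | hge
  · by_cases hadj : v = u + 1
    · -- adjacent, a at u holds q.1
      unfold pvCands
      rw [List.mem_map]
      refine ⟨(u : Int), ?_, ?_⟩
      · rw [PySem.List.mem_pyRange_one]; omega
      · have hga : PySem.List.pyGetD (pvOrder t) (u : Int) (0, 0) = (pvOrder t)[u] := by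
          rw [PySem.List.pyGetD_eq_getElem _ _ (by omega) (by omega)]
          simp
        have hgb : PySem.List.pyGetD (pvOrder t) ((u : Int) + 1) (0, 0) = (pvOrder t)[v] := by
          rw [PySem.List.pyGetD_eq_getElem _ _ (by omega) (by omega)]; congr 1; omega
        have hab1 : PySem.List.pyGetD t q.1 0 ≤ PySem.List.pyGetD t q.2 0 := by
          have h := hP _ _ hu hv hlt
          rw [hu', hv'] at h
          unfold pvLeL at h
          simp only [] at h
          omega
        simp only [pvCand, hga, hgb, hu', hv']
        rw [if_pos (show q.1 < q.2 by omega)]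
        unfold pvKey
        rw [abs_eq_sub hab1]
    · exact absurd (no_middle t q hq hmin u v (by omega) hv (Or.inl ⟨hu', hv'⟩)) (by simp)
  · have hlt' : v < u := by omega
    by_cases hadj : u = v + 1
    · unfold pvCands
      rw [List.mem_map]
      refine ⟨(v : Int), ?_, ?_⟩
      · rw [PySem.List.mem_pyRange_one]; omega
      · have hga : PySem.List.pyGetD (pvOrder t) (v : Int) (0, 0) = (pvOrder t)[v] := by
          rw [PySem.List.pyGetD_eq_getElem _ _ (by omega) (by omega)]
          simp
        have hgb : PySem.List.pyGetD (pvOrder t) ((v : Int) + 1) (0, 0) = (pvOrder t)[u] := by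
          rw [PySem.List.pyGetD_eq_getElem _ _ (by omega) (by omega)]; congr 1; omega
        have hab1 : PySem.List.pyGetD t q.2 0 ≤ PySem.List.pyGetD t q.1 0 := by
          have h := hP _ _ hv hu hlt'
          rw [hu', hv'] at h
          unfold pvLeL at h
          simp only [] at h
          omega
        simp only [pvCand, hga, hgb, hu', hv']
        rw [if_neg (show ¬ q.2 < q.1 by omega)]
        unfold pvKey
        rw [abs_sub_comm, abs_eq_sub hab1]
    · exact absurd (no_middle t q hq hmin v u (by omega) hu (Or.inr ⟨hv', hu'⟩)) (by simp)

-- ===== VERDICT (by name: the statement is the Claim_ definition above) =====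
theorem find_closest_temperatures_spec : Claim_equal_find_closest_temperatures := by
  intro t hdom hpre
  unfold Spec_find_closest_temperatures
  unfold Pre_find_closest_temperatures at hpre
  have h01 : ((0 : Int), (1 : Int)) ∈ pvPairs t := by
    rw [mem_pvPairs]
    refine ⟨le_refl 0, by norm_num, by push_cast; omega⟩
  have hLne : (pvPairs t).map (pvKey t) ≠ [] := by
    simp only [ne_eq, List.map_eq_nil_iff]
    intro h
    rw [h] at h01
    exact absurd h01 List.not_mem_nil
  obtain ⟨x, xs, hL⟩ := List.exists_cons_of_ne_nil hLne
  have hpw : ((pvPairs t).map (pvKey t)).Pairwise (fun e f => pvILt e.2 f.2) := by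
    rw [List.pairwise_map]
    exact (pairwise_pvPairs t).imp (fun h => h)
  rw [hL] at hpw
  have hpw' := List.pairwise_cons.mp hpw
  have hA := A_eq_fold t x xs hL
  rw [foldG_some, foldA_eq_foldSel xs x hpw'.1 hpw'.2] at hA
  set m1 := xs.foldl pvSel x with hm1
  have hm1mem : ∃ q ∈ pvPairs t, m1 = pvKey t q := by
    have hx : m1 ∈ (pvPairs t).map (pvKey t) := by
      rw [hL]
      rcases fold_sel_mem xs x with h | h
      · rw [hm1, h]; exact List.mem_cons_self
      · exact List.mem_cons_of_mem _ h
    rw [List.mem_map] at hx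
    obtain ⟨q, hq, he⟩ := hx
    exact ⟨q, hq, he.symm⟩
  have hm1min : ∀ q ∈ pvPairs t, ¬ pvLt (pvKey t q) m1 := by
    intro q hq
    have hmm : pvKey t q ∈ x :: xs := by
      rw [← hL]; exact List.mem_map_of_mem hq
    rcases List.mem_cons.mp hmm with he | he
    · rw [he]; exact fold_sel_le_init xs x
    · exact fold_sel_min xs x _ he
  have hm1c : m1 ∈ pvCands t := min_mem_cands t m1 hm1mem hm1min
  obtain ⟨c, cs, hC⟩ := List.exists_cons_of_ne_nil (List.ne_nil_of_mem hm1c)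
  have hB := B_eq_fold t c cs hC
  set m2 := cs.foldl pvSel c with hm2
  have hm2mem : m2 ∈ pvCands t := by
    rw [hC]
    rcases fold_sel_mem cs c with h | h
    · rw [hm2, h]; exact List.mem_cons_self
    · exact List.mem_cons_of_mem _ h
  have hle1 : ¬ pvLt m1 m2 := by
    rcases List.mem_cons.mp (hC ▸ hm1c) with he | he
    · rw [he]; exact fold_sel_le_init cs c
    · exact fold_sel_min cs c m1 he
  have hle2 : ¬ pvLt m2 m1 := by
    obtain ⟨q2, hq2, he2⟩ := cand_is_key t m2 hm2mem
    rw [he2]; exact hm1min q2 hq2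
  have hm12 : m1 = m2 := pvLe_antisymm hle1 hle2
  rw [hA, hB, ← hm12]
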